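-- pv_equiv track=rewrite | github.com/PRANEETHCHALAPATI/Data_Structures | math_basics/calculate_digit_sum.py | calculate_digit_sum
-- ===== SOURCE A (Python) =====
-- def calculate_digit_sum(N1, N2):
--     total_sum = 0
--     for i in range(N1, N2 + 1):
--         temp = i
--         while temp != 0:
--             total_sum += temp % 10
--             temp = temp // 10
--     return total_sum
-- ===== SOURCE B (Python) =====
-- def calculate_digit_sum(N1, N2):
--     # prefix-sum closed form: f(n) = sum of digit sums of 0..n, computed per digit position
--     if N2 < N1:
--         return 0
--     def f(n):
--         if n < 0:
--             return 0
--         total = 0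
--         p = 1
--         while p <= n:
--             q = n // p
--             higher, cur = divmod(q, 10)
--             lower = n % p
--             total += higher * 45 * p + cur * (cur - 1) // 2 * p + cur * (lower + 1)
--             p *= 10
--         return total
--     return f(N2) - f(N1 - 1)
-- ===== Notes on version B (the rewrite author's own statement) =====
-- stated objective: faster
-- what changed: B replaces A's per-number digit loop over the whole range with a closed-form per-digit-position prefix sum f(N) (digit-DP) and returns f(N2) - f(N1-1), turning O((N2-N1)*log N2) work into O(log N2).
import Mathlib
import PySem

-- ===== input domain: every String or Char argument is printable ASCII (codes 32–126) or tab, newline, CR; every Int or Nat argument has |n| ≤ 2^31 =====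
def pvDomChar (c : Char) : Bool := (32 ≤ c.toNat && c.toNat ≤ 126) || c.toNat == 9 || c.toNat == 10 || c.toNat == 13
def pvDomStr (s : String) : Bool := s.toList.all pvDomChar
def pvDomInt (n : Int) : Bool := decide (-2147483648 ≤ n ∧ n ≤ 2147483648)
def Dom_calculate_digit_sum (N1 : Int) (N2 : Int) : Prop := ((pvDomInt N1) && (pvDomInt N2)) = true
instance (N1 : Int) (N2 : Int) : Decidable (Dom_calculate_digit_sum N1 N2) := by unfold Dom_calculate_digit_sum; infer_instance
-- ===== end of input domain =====

-- B replaces A's per-number digit loop over the range with a closed-form per-digit-position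
-- prefix sum f(N) and returns f(N2) - f(N1-1) (objective: faster, asymptotically).


-- ===== PORT A =====
-- inner 'while temp != 0' loop of A, with a structural fuel guard for totality
-- (fuel temp.toNat + 1 is more than the number of iterations on temp ≥ 0).
-- For temp < 0 Python's loop never terminates (temp // 10 stalls at -1); that
-- branch returns the accumulator here and such inputs are excluded by Pre_ below.
def pvDigitLoop : Nat → Int → Int → Int
  | 0, _, acc => acc
  | fuel + 1, temp, acc =>
    if temp = 0 then acc
    else if temp < 0 then acc
    else pvDigitLoop fuel (PySem.Int.floordiv temp 10) (acc + PySem.Int.mod temp 10)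

def calculate_digit_sum (N1 : Int) (N2 : Int) : Int :=
  (PySem.List.pyRange N1 (N2 + 1) 1).foldl
    (fun total_sum i => pvDigitLoop (i.toNat + 1) i total_sum) 0

-- ===== PORT B =====
-- while p <= n: accumulate the closed-form contribution of digit position p
-- (q = n//p; higher, cur = divmod(q,10); lower = n%p), then p *= 10.
-- Fuel (structural guard): (n+1-p).toNat bounds the iteration count.
def pvPrefixLoop : Nat → Int → Int → Int → Int
  | 0, _, _, acc => acc
  | fuel + 1, n, p, acc =>
    if 0 < p ∧ p ≤ n then
      pvPrefixLoop fuel n (p * 10)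
        (acc + PySem.Int.floordiv (PySem.Int.floordiv n p) 10 * 45 * p
             + PySem.Int.floordiv (PySem.Int.mod (PySem.Int.floordiv n p) 10 *
                 (PySem.Int.mod (PySem.Int.floordiv n p) 10 - 1)) 2 * p
             + PySem.Int.mod (PySem.Int.floordiv n p) 10 * (PySem.Int.mod n p + 1))
    else acc

-- f(n) = sum of digit sums of 0..n
def pvPrefix (n : Int) : Int := if n < 0 then 0 else pvPrefixLoop (n.toNat + 1) n 1 0

def calculate_digit_sum_alt (N1 : Int) (N2 : Int) : Int :=
  if N2 < N1 then 0 else pvPrefix N2 - pvPrefix (N1 - 1)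

-- ===== PRECONDITION & SPEC =====
-- Pre_ excludes only inputs where A never returns: if the range contains a negative
-- number (N1 < 0 and N1 ≤ N2), A's inner while loop runs forever (temp // 10 stalls at -1).
def Pre_calculate_digit_sum (N1 : Int) (N2 : Int) : Prop := 0 ≤ N1 ∨ N2 < N1
instance (N1 : Int) (N2 : Int) : Decidable (Pre_calculate_digit_sum N1 N2) := by unfold Pre_calculate_digit_sum; infer_instance

def pvWitness_calculate_digit_sum : Int × Int := (3, 20)

def Spec_calculate_digit_sum (N1 : Int) (N2 : Int) (out : Int) : Prop := out = calculate_digit_sum_alt N1 N2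
instance (N1 : Int) (N2 : Int) (out : Int) : Decidable (Spec_calculate_digit_sum N1 N2 out) := by unfold Spec_calculate_digit_sum; infer_instance

-- ===== CLAIM (what is proved, stated in full; the proofs are below) =====
def Claim_equal_calculate_digit_sum : Prop := ∀ (N1 : Int) (N2 : Int), Dom_calculate_digit_sum N1 N2 → Pre_calculate_digit_sum N1 N2 → Spec_calculate_digit_sum N1 N2 (calculate_digit_sum N1 N2)

-- ===== LEMMAS AND PROOFS =====

-- digit sum of t (A's inner loop result on zero accumulator, with adequate fuel)
def pvDS (t : Int) : Int := pvDigitLoop (t.toNat + 1) t 0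

theorem pvDS_def (t : Int) : pvDS t = pvDigitLoop (t.toNat + 1) t 0 := rfl

-- the one-position contribution B adds while p ≤ n, as written in the port
def pvCexpr (n p : Int) : Int :=
  PySem.Int.floordiv (PySem.Int.floordiv n p) 10 * 45 * p
    + PySem.Int.floordiv (PySem.Int.mod (PySem.Int.floordiv n p) 10 *
        (PySem.Int.mod (PySem.Int.floordiv n p) 10 - 1)) 2 * p
    + PySem.Int.mod (PySem.Int.floordiv n p) 10 * (PySem.Int.mod n p + 1)

-- the same contribution in Euclidean (/ , %) form
def pvCE (n p : Int) : Int :=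
  n / p / 10 * 45 * p + (n / p % 10 * (n / p % 10 - 1)) / 2 * p + n / p % 10 * (n % p + 1)

theorem pvCexpr_eq (n p : Int) (hp : 0 < p) : pvCexpr n p = pvCE n p := by
  unfold pvCexpr pvCE
  rw [PySem.Int.floordiv_eq_ediv_of_pos hp, PySem.Int.mod_eq_emod_of_pos hp,
      PySem.Int.floordiv_eq_ediv_of_pos (by norm_num : (0:Int) < 10),
      PySem.Int.mod_eq_emod_of_pos (by norm_num : (0:Int) < 10),
      PySem.Int.floordiv_eq_ediv_of_pos (by norm_num : (0:Int) < 2)]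

theorem pvDigitLoop_acc (f : Nat) : ∀ t a : Int, pvDigitLoop f t a = a + pvDigitLoop f t 0 := by
  induction f with
  | zero => intro t a; simp [pvDigitLoop]
  | succ f ih =>
    intro t a
    simp only [pvDigitLoop]
    split_ifs with h1 h2
    · omega
    · omega
    · conv_lhs => rw [ih]
      conv_rhs => rw [ih]
      ring

theorem pvDS_zero : pvDS 0 = 0 := by decide

theorem pvDigitLoop_fuel (f1 : Nat) : ∀ (f2 : Nat) (t a : Int), t.toNat < f1 → t.toNat < f2 →
    pvDigitLoop f1 t a = pvDigitLoop f2 t a := by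
  induction f1 with
  | zero => intro f2 t a h1 _; omega
  | succ f1 ih =>
    intro f2 t a h1 h2
    cases f2 with
    | zero => omega
    | succ f2 =>
      simp only [pvDigitLoop]
      split_ifs with hh1 hh2
      · rfl
      · rfl
      · rw [PySem.Int.floordiv_eq_ediv_of_pos (by norm_num : (0:Int) < 10)]
        exact ih f2 (t / 10) _ (by omega) (by omega)

theorem pvDS_step (t : Int) (ht : 0 < t) : pvDS t = t % 10 + pvDS (t / 10) := by
  rw [pvDS_def, pvDS_def]
  conv_lhs => rw [pvDigitLoop]
  rw [if_neg (by omega), if_neg (by omega),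
      PySem.Int.floordiv_eq_ediv_of_pos (by norm_num : (0:Int) < 10),
      PySem.Int.mod_eq_emod_of_pos (by norm_num : (0:Int) < 10),
      pvDigitLoop_fuel t.toNat ((t / 10).toNat + 1) (t / 10) _ (by omega) (by omega),
      pvDigitLoop_acc]
  ring

theorem pvPrefixLoop_acc (f : Nat) : ∀ n p acc : Int, pvPrefixLoop f n p acc = acc + pvPrefixLoop f n p 0 := by
  induction f with
  | zero => intro n p acc; simp [pvPrefixLoop]
  | succ f ih =>
    intro n p acc
    simp only [pvPrefixLoop]
    split_ifs with h
    · conv_lhs => rw [ih]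
      conv_rhs => rw [ih]
      ring
    · omega

theorem pvPrefixLoop_stop (f : Nat) (n p acc : Int) (h : ¬(0 < p ∧ p ≤ n)) :
    pvPrefixLoop f n p acc = acc := by
  cases f with
  | zero => rfl
  | succ f => simp only [pvPrefixLoop]; rw [if_neg h]

theorem pvPrefixLoop_fuel (f1 : Nat) : ∀ (f2 : Nat) (n p acc : Int),
    (n + 1 - p).toNat ≤ f1 → (n + 1 - p).toNat ≤ f2 → 0 < p →
    pvPrefixLoop f1 n p acc = pvPrefixLoop f2 n p acc := by
  induction f1 with
  | zero =>
    intro f2 n p acc h1 h2 hp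
    have hstop : ¬(0 < p ∧ p ≤ n) := by rintro ⟨_, hc⟩; omega
    rw [pvPrefixLoop_stop 0 n p acc hstop, pvPrefixLoop_stop f2 n p acc hstop]
  | succ f1 ih =>
    intro f2 n p acc h1 h2 hp
    by_cases hc : 0 < p ∧ p ≤ n
    · cases f2 with
      | zero => omega
      | succ f2 =>
        simp only [pvPrefixLoop]
        rw [if_pos hc, if_pos hc]
        exact ih f2 n (p * 10) _ (by omega) (by omega) (by omega)
    · rw [pvPrefixLoop_stop (f1 + 1) n p acc hc, pvPrefixLoop_stop f2 n p acc hc]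

theorem pvPrefixLoop_step (f : Nat) (n p : Int) (hp : 0 < p) (hpn : p ≤ n) :
    pvPrefixLoop (f + 1) n p 0 = pvCexpr n p + pvPrefixLoop f n (p * 10) 0 := by
  simp only [pvPrefixLoop]
  rw [if_pos ⟨hp, hpn⟩, pvPrefixLoop_acc]
  unfold pvCexpr
  ring

-- triangular-number step used in the rollover case of pvCE_diff
theorem pv_tri_step (d : Int) (h1 : 1 ≤ d) (h9 : d < 10) :
    d * (d - 1) / 2 = ((d - 1) * ((d - 1) - 1)) / 2 + (d - 1) := by
  interval_cases d <;> norm_num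

-- per-position difference: for p ≤ n-1, the position-p contribution grows by digit (n/p)%10
theorem pvCE_diff (n p : Int) (hp : 0 < p) (hpn : p ≤ n - 1) :
    pvCE n p = pvCE (n - 1) p + n / p % 10 := by
  have hqr : p * (n / p) + n % p = n := Int.mul_ediv_add_emod n p
  have hr0 : 0 ≤ n % p := Int.emod_nonneg n (by omega)
  have hrp : n % p < p := Int.emod_lt_of_pos n hp
  by_cases hc : 0 < n % p
  · have e1 : (n - 1) / p = n / p ∧ (n - 1) % p = n % p - 1 :=
      (Int.ediv_emod_unique hp).mpr ⟨by linarith, by omega, by omega⟩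
    unfold pvCE
    rw [e1.1, e1.2]
    ring
  · have hr' : n % p = 0 := by omega
    have hq1 : 1 ≤ n / p := (Int.le_ediv_iff_mul_le hp).mpr (by omega)
    have e1 : (n - 1) / p = n / p - 1 ∧ (n - 1) % p = p - 1 :=
      (Int.ediv_emod_unique hp).mpr ⟨by linear_combination hqr - hr', by omega, by omega⟩
    unfold pvCE
    rw [e1.1, e1.2, hr']
    by_cases hd : 0 < n / p % 10
    · have ed1 : (n / p - 1) / 10 = n / p / 10 := by omega
      have ed2 : (n / p - 1) % 10 = n / p % 10 - 1 := by omega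
      rw [ed1, ed2, pv_tri_step (n / p % 10) (by omega) (by omega)]
      ring
    · have hd0 : n / p % 10 = 0 := by omega
      have ed1 : (n / p - 1) / 10 = n / p / 10 - 1 := by omega
      have ed2 : (n / p - 1) % 10 = 9 := by omega
      rw [ed1, ed2, hd0]
      norm_num
      ring

-- outside the loop range every term vanishes
theorem pvKey_base (f : Nat) (n p : Int) (hn : 1 ≤ n) (hpn : n < p) :
    pvPrefixLoop f n p 0 = pvPrefixLoop f (n - 1) p 0 + pvDS (n / p) := by
  rw [pvPrefixLoop_stop f n p 0 (by rintro ⟨_, hc⟩; omega),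
      pvPrefixLoop_stop f (n - 1) p 0 (by rintro ⟨_, hc⟩; omega),
      Int.ediv_eq_zero_of_lt (by omega) hpn, pvDS_zero]
  norm_num

-- core invariant: the tail of B's loop from position p grows by the digit sum of n/p
theorem pvKey (f : Nat) : ∀ n p : Int, (n + 1 - p).toNat ≤ f → 0 < p → 1 ≤ n →
    pvPrefixLoop f n p 0 = pvPrefixLoop f (n - 1) p 0 + pvDS (n / p) := by
  induction f with
  | zero =>
    intro n p hk hp hn
    exact pvKey_base 0 n p hn (by omega)
  | succ f ih =>
    intro n p hk hp hn
    by_cases hpn : p ≤ n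
    · by_cases hpn1 : p ≤ n - 1
      · have hq1 : 1 ≤ n / p := (Int.le_ediv_iff_mul_le hp).mpr (by omega)
        have hdd : n / p / 10 = n / (p * 10) := Int.ediv_ediv_of_nonneg (by omega)
        rw [pvPrefixLoop_step f n p hp hpn, pvPrefixLoop_step f (n - 1) p hp hpn1,
            ih n (p * 10) (by omega) (by omega) hn,
            pvDS_step (n / p) (by omega), hdd,
            pvCexpr_eq n p hp, pvCexpr_eq (n - 1) p hp, pvCE_diff n p hp hpn1]
        ring
      · have hnp : n = p := by omega
        subst hnp
        rw [pvPrefixLoop_step f n n (by omega) le_rfl,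
            pvPrefixLoop_stop f n (n * 10) 0 (by rintro ⟨_, hc⟩; omega),
            pvPrefixLoop_stop (f + 1) (n - 1) n 0 (by rintro ⟨_, hc⟩; omega),
            pvCexpr_eq n n (by omega), Int.ediv_self (by omega)]
        have hds1 : pvDS 1 = 1 := by decide
        rw [hds1]
        unfold pvCE
        rw [Int.ediv_self (by omega), Int.emod_self]
        norm_num
    · exact pvKey_base (f + 1) n p hn (by omega)

-- the prefix function satisfies f(n) = f(n-1) + digitsum(n) for n ≥ 1
theorem pvPrefix_diff (n : Int) (hn : 1 ≤ n) :
    pvPrefix n = pvPrefix (n - 1) + pvDS n := by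
  unfold pvPrefix
  rw [if_neg (by omega), if_neg (by omega)]
  have h := pvKey (n.toNat + 1) n 1 (by omega) (by norm_num) hn
  rw [Int.ediv_one] at h
  rw [h, pvPrefixLoop_fuel (n.toNat + 1) ((n - 1).toNat + 1) (n - 1) 1 0 (by omega) (by omega)
        (by norm_num)]

-- singleton range N1..N1
theorem pvMain_single (N1 : Int) (h0 : 0 ≤ N1) :
    (PySem.List.pyRange N1 (N1 + 1) 1).foldl
        (fun total_sum i => pvDigitLoop (i.toNat + 1) i total_sum) 0 =
      pvPrefix N1 - pvPrefix (N1 - 1) := by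
  rw [PySem.List.pyRange_one_singleton]
  show pvDS N1 = _
  by_cases hN : 1 ≤ N1
  · rw [pvPrefix_diff N1 hN]; ring
  · have h1 : N1 = 0 := by omega
    subst h1
    decide

theorem pvMain (k : Nat) : ∀ N1 N2 : Int, 0 ≤ N1 → N1 ≤ N2 → (N2 - N1).toNat ≤ k →
    (PySem.List.pyRange N1 (N2 + 1) 1).foldl
        (fun total_sum i => pvDigitLoop (i.toNat + 1) i total_sum) 0 =
      pvPrefix N2 - pvPrefix (N1 - 1) := by
  induction k with
  | zero =>
    intro N1 N2 h0 h1 hk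
    have he : N2 = N1 := by omega
    subst he
    exact pvMain_single N2 h0
  | succ k ih =>
    intro N1 N2 h0 h1 hk
    by_cases he : N2 = N1
    · subst he
      exact pvMain_single N2 h0
    · have hsplit : PySem.List.pyRange N1 (N2 + 1) 1 =
          PySem.List.pyRange N1 N2 1 ++ [N2] :=
        PySem.List.pyRange_one_succ_right (by omega)
      have hN2 : PySem.List.pyRange N1 N2 1 = PySem.List.pyRange N1 ((N2 - 1) + 1) 1 := by
        norm_num
      rw [hsplit, List.foldl_append, hN2, ih N1 (N2 - 1) h0 (by omega) (by omega)]
      show pvDigitLoop (N2.toNat + 1) N2 _ = _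
      rw [pvDigitLoop_acc, pvPrefix_diff N2 (by omega), ← pvDS_def]
      ring

-- ===== VERDICT (by name: the statement is the Claim_ definition above) =====
theorem calculate_digit_sum_spec : Claim_equal_calculate_digit_sum := by
  intro N1 N2 _ hpre
  unfold Spec_calculate_digit_sum calculate_digit_sum calculate_digit_sum_alt
  by_cases h : N2 < N1
  · rw [if_pos h, PySem.List.pyRange_one_eq_nil (by omega)]
    rfl
  · rw [if_neg h]
    have h0 : 0 ≤ N1 := by
      rcases hpre with h1 | h1
      · exact h1
      · omega
    exact pvMain (N2 - N1).toNat N1 N2 h0 (by omega) le_rfl
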